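-- pv_equiv track=rewrite | github.com/Wakcedon/jarvis | jarvis/app.py | _find_sentence_cut
-- ===== SOURCE A (Python) =====
-- def _find_sentence_cut(buf: str) -> int | None:
--     """Возвращает индекс (включая знак), где можно безопасно отрезать предложение."""
--     if not buf:
--         return None
--     # ищем конец предложения
--     for i, ch in enumerate(buf):
--         if ch in ".!?…":
--             # берём идущие подряд знаки пунктуации
--             j = i + 1
--             while j < len(buf) and buf[j] in ".!?…":
--                 j += 1
--             return j
--     return None
-- ===== SOURCE B (Python) =====
-- import re
--
-- _CUT_RE = re.compile(r"[.!?\u2026]+")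
--
-- def _find_sentence_cut(buf: str):
--     m = _CUT_RE.search(buf)
--     return m.end() if m else None
-- ===== Notes on version B (the rewrite author's own statement) =====
-- stated objective: idiomatic
-- what changed: The explicit character loop with an inner while extending the punctuation run is replaced by a single compiled-regex search for the first maximal run [.!?…]+ whose end index is returned (None covers both empty input and no match).
import Mathlib
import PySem

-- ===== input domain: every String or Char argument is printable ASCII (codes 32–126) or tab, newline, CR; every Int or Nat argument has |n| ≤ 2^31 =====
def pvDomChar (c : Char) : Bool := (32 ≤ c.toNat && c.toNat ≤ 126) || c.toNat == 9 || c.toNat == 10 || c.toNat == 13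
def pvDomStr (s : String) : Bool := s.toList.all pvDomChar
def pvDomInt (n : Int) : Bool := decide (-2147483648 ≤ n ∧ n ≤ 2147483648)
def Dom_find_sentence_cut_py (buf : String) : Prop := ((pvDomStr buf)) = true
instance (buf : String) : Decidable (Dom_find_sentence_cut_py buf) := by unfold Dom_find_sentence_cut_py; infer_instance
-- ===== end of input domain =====

-- B replaces A's explicit loop + inner while with a regex-style search for the
-- first maximal run of sentence-ending punctuation (idiomatic; same complexity).

-- ===== PORT A =====
-- ch in ".!?…"
def pvIsCut (c : Char) : Bool := c = '.' || c = '!' || c = '?' || c = '…'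

-- inner while: j starts at i+1; the chars at indices i+1.. are exactly `rest`
def pvRunEnd : List Char → Nat → Nat
  | [], j => j
  | c :: rest, j => if pvIsCut c then pvRunEnd rest (j + 1) else j

-- for i, ch in enumerate(buf): …
def pvFindA : List Char → Nat → Option Int
  | [], _ => none
  | c :: rest, i =>
    if pvIsCut c then some ((pvRunEnd rest (i + 1) : Nat) : Int)
    else pvFindA rest (i + 1)

def find_sentence_cut_py (buf : String) : Option Int :=
  if buf.toList = [] then none else pvFindA buf.toList 0

-- ===== PORT B =====
-- re.search(r"[.!?…]+", buf): first index matching the class, extended greedily;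
-- .end() = start + run length; none when there is no match (covers empty input).
def find_sentence_cut_py_alt (buf : String) : Option Int :=
  let cs := buf.toList
  match cs.findIdx? pvIsCut with
  | none => none
  | some i => some (((i + ((cs.drop i).takeWhile pvIsCut).length : Nat) : Int))

-- ===== PRECONDITION & SPEC =====
def Spec_find_sentence_cut_py (buf : String) (out : Option Int) : Prop := out = find_sentence_cut_py_alt buf
instance (buf : String) (out : Option Int) : Decidable (Spec_find_sentence_cut_py buf out) := by unfold Spec_find_sentence_cut_py; infer_instance

-- ===== CLAIM (what is proved, stated in full; the proofs are below) =====
def Claim_equal_find_sentence_cut_py : Prop := ∀ (buf : String), Dom_find_sentence_cut_py buf → Spec_find_sentence_cut_py buf (find_sentence_cut_py buf)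

-- ===== LEMMAS AND PROOFS =====

lemma pvRunEnd_eq (cs : List Char) : ∀ j, pvRunEnd cs j = j + (cs.takeWhile pvIsCut).length := by
  induction cs with
  | nil => intro j; simp [pvRunEnd]
  | cons c rest ih =>
    intro j
    by_cases h : pvIsCut c = true
    · simp [pvRunEnd, h, ih]; omega
    · simp [pvRunEnd, h]

lemma pvFindA_eq (cs : List Char) : ∀ i, pvFindA cs i =
    match cs.findIdx? pvIsCut with
    | none => none
    | some k => some (((i + k + ((cs.drop k).takeWhile pvIsCut).length : Nat) : Int)) := by
  induction cs with
  | nil => intro i; simp [pvFindA, List.findIdx?_nil]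
  | cons c rest ih =>
    intro i
    by_cases h : pvIsCut c = true
    · simp [pvFindA, h, List.findIdx?_cons, pvRunEnd_eq]
      omega
    · simp only [pvFindA, h, if_false, List.findIdx?_cons, Bool.false_eq_true]
      rw [ih (i + 1)]
      cases hk : rest.findIdx? pvIsCut with
      | none => simp
      | some k =>
        simp only [Option.map_some, List.drop_succ_cons]
        congr 1
        omega

-- ===== VERDICT (by name: the statement is the Claim_ definition above) =====
theorem find_sentence_cut_py_spec : Claim_equal_find_sentence_cut_py := by
  intro buf _
  unfold Spec_find_sentence_cut_py find_sentence_cut_py find_sentence_cut_py_alt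
  cases hcs : buf.toList with
  | nil => simp [List.findIdx?_nil]
  | cons c rest =>
    simp only [reduceCtorEq, if_false]
    rw [pvFindA_eq]
    cases hk : (c :: rest).findIdx? pvIsCut with
    | none => simp
    | some k => simp
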